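-- pv_equiv track=rewrite | github.com/Unknownflow/CS1010X | Lecture/Final Review/q7.py | power_set_check
-- ===== SOURCE A (Python) =====
-- def power_set_check(lst):
--     longest_set = []
--     for item in lst:
--         if len(item) > len(longest_set):
--             longest_set = item
--     lst.sort()
--     def power_set(input_list):
--         # Start with the empty set
--         result = [[]]
--
--         # Iterate over every element in the input list
--         for elem in input_list:
--             # For each element, add it to all existing subsets in the result
--             new_subsets = [subset + [elem] for subset in result]
--             result.extend(new_subsets)
--
--         result.sort()
--         return result
--
--     return power_set(longest_set) == lst
-- ===== SOURCE B (Python) =====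
-- def power_set_check(lst):
--     longest = []
--     for item in lst:
--         if len(item) > len(longest):
--             longest = item
--     lst.sort()
--     subsets = []
--     for mask in range(2 ** len(longest)):
--         subset = []
--         m = mask
--         for x in longest:
--             if m % 2 == 1:
--                 subset.append(x)
--             m //= 2
--         subsets.append(subset)
--     subsets.sort()
--     return subsets == lst
-- ===== Notes on version B (the rewrite author's own statement) =====
-- stated objective: alternative
-- what changed: Replaces the incremental doubling of the subset list (result.extend of each old subset plus the new element) by a direct bitmask enumeration: one subset per integer mask in range(2**n), selecting elements by reading the mask's bits with %2 and //=2.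
import Mathlib
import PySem

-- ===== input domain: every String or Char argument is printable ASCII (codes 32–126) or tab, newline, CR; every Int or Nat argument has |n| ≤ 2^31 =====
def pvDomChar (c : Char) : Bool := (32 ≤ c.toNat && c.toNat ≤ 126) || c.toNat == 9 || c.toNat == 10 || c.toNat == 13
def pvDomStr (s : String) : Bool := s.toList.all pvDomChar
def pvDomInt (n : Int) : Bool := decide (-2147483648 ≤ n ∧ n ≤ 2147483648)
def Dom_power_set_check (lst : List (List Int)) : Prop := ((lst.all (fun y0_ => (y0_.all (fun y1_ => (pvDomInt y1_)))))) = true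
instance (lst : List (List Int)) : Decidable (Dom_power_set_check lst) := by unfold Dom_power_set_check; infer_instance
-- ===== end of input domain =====

-- B replaces A's incremental-doubling power-set construction by a bitmask enumeration
-- (one subset per integer mask, bits read by % 2 and // 2); same return value, and B
-- performs the same in-place lst.sort() mutation as A (the claim is about the return value).


-- ===== PORT A =====
def power_set_check (lst : List (List Int)) : Bool :=
  let longest_set := lst.foldl
    (fun longest_set item => if item.length > longest_set.length then item else longest_set) []
  let lstSorted := PySem.List.sorted lst (fun x => x) false   -- lst.sort()
  -- power_set(longest_set): start with [[]], double on each element, then sort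
  let result := longest_set.foldl
    (fun result elem => result ++ result.map (fun subset => subset ++ [elem])) [[]]
  let resultSorted := PySem.List.sorted result (fun x => x) false
  resultSorted == lstSorted

-- ===== PORT B =====
def power_set_check_alt (lst : List (List Int)) : Bool :=
  let longest := lst.foldl
    (fun longest item => if item.length > longest.length then item else longest) []
  let lstSorted := PySem.List.sorted lst (fun x => x) false   -- lst.sort()
  -- for mask in range(2 ** len(longest)): read bits of mask with m % 2 / m //= 2
  let subsets := (PySem.List.pyRange 0 (2 ^ longest.length) 1).map (fun mask =>
    (longest.foldl
      (fun (p : List Int × Int) x =>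
        (if PySem.Int.mod p.2 2 == 1 then p.1 ++ [x] else p.1, PySem.Int.floordiv p.2 2))
      ([], mask)).1)
  let subsetsSorted := PySem.List.sorted subsets (fun x => x) false
  subsetsSorted == lstSorted

-- ===== PRECONDITION & SPEC =====
def Spec_power_set_check (lst : List (List Int)) (out : Bool) : Prop := out = power_set_check_alt lst
instance (lst : List (List Int)) (out : Bool) : Decidable (Spec_power_set_check lst out) := by unfold Spec_power_set_check; infer_instance

-- ===== CLAIM (what is proved, stated in full; the proofs are below) =====
def Claim_equal_power_set_check : Prop := ∀ (lst : List (List Int)), Dom_power_set_check lst → Spec_power_set_check lst (power_set_check lst)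

-- ===== LEMMAS AND PROOFS =====

/-- B's inner bit-reading loop, as a structural recursion over the element list (Int mask). -/
def gInt : Int → List Int → List Int
  | _, [] => []
  | m, x :: xs => (if PySem.Int.mod m 2 == 1 then [x] else []) ++ gInt (PySem.Int.floordiv m 2) xs

/-- The same bit-reading on a Nat mask. -/
def gNat : Nat → List Int → List Int
  | _, [] => []
  | k, x :: xs => (if k % 2 == 1 then [x] else []) ++ gNat (k / 2) xs

lemma foldl_bits (l : List Int) : ∀ (acc : List Int) (m : Int),
    (l.foldl (fun (p : List Int × Int) x =>
        (if PySem.Int.mod p.2 2 == 1 then p.1 ++ [x] else p.1, PySem.Int.floordiv p.2 2))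
      (acc, m)).1 = acc ++ gInt m l := by
  induction l with
  | nil => intro acc m; simp [gInt]
  | cons x xs ih =>
    intro acc m
    rw [List.foldl_cons, ih]
    simp only [gInt]
    by_cases h : (PySem.Int.mod m 2 == 1) = true
    · rw [if_pos h, if_pos h, List.append_assoc]
    · rw [if_neg h, if_neg h]; rfl

lemma gInt_natCast (l : List Int) : ∀ (k : Nat), gInt (k : Int) l = gNat k l := by
  induction l with
  | nil => intro k; rfl
  | cons x xs ih =>
    intro k
    have h2 : (2 : Int) = ((2 : Nat) : Int) := rfl
    simp only [gInt, gNat, h2, PySem.Int.mod_natCast, PySem.Int.floordiv_natCast, ih]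
    have : ((((k % 2 : Nat)) : Int) == 1) = ((k % 2) == 1) := by
      rcases Nat.mod_two_eq_zero_or_one k with h | h <;> simp [h]
    rw [this]

lemma gNat_double (x : Int) (xs : List Int) (j : Nat) :
    gNat (2 * j) (x :: xs) = gNat j xs := by
  simp [gNat, Nat.mul_mod_right, Nat.mul_div_cancel_left j (by norm_num : 0 < 2)]

lemma gNat_double_succ (x : Int) (xs : List Int) (j : Nat) :
    gNat (2 * j + 1) (x :: xs) = x :: gNat j xs := by
  have h1 : (2 * j + 1) % 2 = 1 := by omega
  have h2 : (2 * j + 1) / 2 = j := by omega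
  simp [gNat, h1, h2]

lemma range_double_perm (k : Nat) :
    (List.range (2 * k)).Perm
      ((List.range k).map (fun j => 2 * j) ++ (List.range k).map (fun j => 2 * j + 1)) := by
  apply (List.perm_ext_iff_of_nodup (List.nodup_range) ?_).2
  · intro m
    simp only [List.mem_range, List.mem_append, List.mem_map]
    constructor
    · intro hm
      rcases Nat.mod_two_eq_zero_or_one m with h | h
      · exact Or.inl ⟨m / 2, by omega, by omega⟩
      · exact Or.inr ⟨m / 2, by omega, by omega⟩
    · rintro (⟨j, hj, rfl⟩ | ⟨j, hj, rfl⟩) <;> omega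
  · refine List.Nodup.append ?_ ?_ ?_
    · exact List.Nodup.map (fun a b h => by omega) List.nodup_range
    · exact List.Nodup.map (fun a b h => by omega) List.nodup_range
    · intro a ha hb
      simp only [List.mem_map, List.mem_range] at ha hb
      obtain ⟨j, _, rfl⟩ := ha
      obtain ⟨i, _, h⟩ := hb
      omega

/-- The bitmask enumeration produces a permutation of sublists'. -/
lemma bitmask_perm (l : List Int) :
    ((List.range (2 ^ l.length)).map (fun k => gNat k l)).Perm l.sublists' := by
  induction l with
  | nil => simp [gNat]
  | cons x xs ih =>
    have hlen : 2 ^ (x :: xs).length = 2 * 2 ^ xs.length := by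
      simp [List.length_cons, pow_succ]; ring
    rw [hlen, List.sublists'_cons]
    refine ((range_double_perm (2 ^ xs.length)).map (fun k => gNat k (x :: xs))).trans ?_
    rw [List.map_append, List.map_map, List.map_map]
    have he : ((fun k => gNat k (x :: xs)) ∘ fun j => 2 * j) = fun j => gNat j xs := by
      funext j; simp [Function.comp, gNat_double]
    have ho : ((fun k => gNat k (x :: xs)) ∘ fun j => 2 * j + 1) = fun j => x :: gNat j xs := by
      funext j; simp [Function.comp, gNat_double_succ]
    rw [he, ho]
    have hmap : (List.range (2 ^ xs.length)).map (fun j => x :: gNat j xs)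
        = ((List.range (2 ^ xs.length)).map (fun j => gNat j xs)).map (List.cons x) := by
      rw [List.map_map]; rfl
    rw [hmap]
    exact List.Perm.append ih (ih.map (List.cons x))

/-- A's doubling loop computes exactly List.sublists. -/
lemma doubling_eq_sublists (l : List Int) :
    l.foldl (fun result elem => result ++ result.map (fun subset => subset ++ [elem])) [[]]
      = l.sublists := by
  induction l using List.reverseRecOn with
  | nil => rfl
  | append_singleton l e ih =>
    rw [List.foldl_append, List.foldl_cons, List.foldl_nil, ih, List.sublists_concat]

lemma sorted_eq_of_perm_id (xs ys : List (List Int)) (hp : xs.Perm ys) :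
    PySem.List.sorted xs (fun x => x) false = PySem.List.sorted ys (fun x => x) false := by
  have hinst : (fun (a b : List Int) => a.decidableLT b)
      = (LinearOrder.toDecidableLT : DecidableLT (List Int)) := by
    funext a b; exact Subsingleton.elim _ _
  show @PySem.List.sorted (List Int) (List Int) List.instLT (fun a b => a.decidableLT b)
        xs (fun x => x) false
      = @PySem.List.sorted (List Int) (List Int) List.instLT (fun a b => a.decidableLT b)
        ys (fun x => x) false
  rw [hinst]
  exact PySem.List.sorted_eq_sorted_of_perm xs ys (fun x => x) (fun _ _ h => h) hp

lemma pyRange_two_pow_map (n : Nat) (f : Int → List Int) :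
    (PySem.List.pyRange 0 ((2 : Int) ^ n) 1).map f
      = (List.range (2 ^ n)).map (fun k : Nat => f (k : Int)) := by
  rw [PySem.List.pyRange_one]
  have hc : (2 : Int) ^ n = ((2 ^ n : Nat) : Int) := by push_cast; ring
  have ht : ((2 : Int) ^ n - 0).toNat = 2 ^ n := by rw [sub_zero, hc, Int.toNat_natCast]
  rw [ht, List.map_map]
  exact List.map_congr_left (fun k _ => by show f (0 + (k : Int)) = f (k : Int); rw [zero_add])

-- ===== VERDICT (by name: the statement is the Claim_ definition above) =====
theorem power_set_check_spec : Claim_equal_power_set_check := by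
  intro lst _
  unfold Spec_power_set_check power_set_check power_set_check_alt
  simp only []
  set longest := lst.foldl
    (fun longest item => if item.length > longest.length then item else longest) [] with hl
  congr 1
  apply sorted_eq_of_perm_id
  rw [doubling_eq_sublists]
  have hmap : (PySem.List.pyRange 0 ((2 : Int) ^ longest.length) 1).map (fun mask =>
      (longest.foldl
        (fun (p : List Int × Int) x =>
          (if PySem.Int.mod p.2 2 == 1 then p.1 ++ [x] else p.1, PySem.Int.floordiv p.2 2))
        ([], mask)).1)
      = (List.range (2 ^ longest.length)).map (fun k => gNat k longest) := by
    rw [pyRange_two_pow_map]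
    exact List.map_congr_left (fun k _ => by
      rw [foldl_bits, gInt_natCast]; exact List.nil_append _)
  rw [hmap]
  exact (List.sublists_perm_sublists' longest).trans (bitmask_perm longest).symm
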